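-- pv_equiv track=rewrite | github.com/kashifusmani/interview_prep | careem/questions/minimumSum/minimumsum.py | getMinimumUniqueSum
-- ===== SOURCE A (Python) =====
-- def getMinimumUniqueSum(arr):
--     seen = set()
--     for elem in arr:
--         if elem not in seen:
--             seen.add(elem)
--         else:
--             x = elem
--             while x in seen:
--                 x = x + 1
--             seen.add(x)
--     return sum(seen)
-- ===== SOURCE B (Python) =====
-- def getMinimumUniqueSum(arr):
--     total = 0
--     nxt = None
--     for x in sorted(arr):
--         if nxt is not None and x < nxt:
--             x = nxt
--         total += x
--         nxt = x + 1
--     return total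
-- ===== Notes on version B (the rewrite author's own statement) =====
-- stated objective: faster
-- what changed: Replaced A's per-element while-loop that bumps duplicates through a growing hash set (O(n^2) worst case) by a single sort-ascending scan assigning each element max(value, next_free) and summing as it goes; the final slot multiset is order-independent (parking-function argument), proved via step commutativity.
import Mathlib
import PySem

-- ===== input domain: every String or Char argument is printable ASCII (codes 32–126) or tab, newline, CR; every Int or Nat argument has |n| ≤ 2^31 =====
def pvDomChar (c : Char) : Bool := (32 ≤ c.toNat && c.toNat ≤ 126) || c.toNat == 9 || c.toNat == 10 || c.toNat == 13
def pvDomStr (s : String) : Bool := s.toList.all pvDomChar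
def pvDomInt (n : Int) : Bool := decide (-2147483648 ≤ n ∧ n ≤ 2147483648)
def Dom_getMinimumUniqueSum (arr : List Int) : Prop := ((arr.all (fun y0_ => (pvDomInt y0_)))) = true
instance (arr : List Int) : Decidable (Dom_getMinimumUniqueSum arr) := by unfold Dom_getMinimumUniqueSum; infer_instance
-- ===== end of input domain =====

-- B replaces A's per-element linear bumping over a growing set (O(n^2)) by a single
-- sort-ascending scan assigning each element max(value, next_free) (O(n log n)).

-- ===== PORT A =====
-- termination helper for the while-loop below (cited by name in decreasing_by)
theorem pyBump_dec (seen : List Int) (x : Int) (h : x ∈ seen) :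
    (seen.filter (fun y => decide (x + 1 ≤ y))).length
      < (seen.filter (fun y => decide (x ≤ y))).length := by
  rw [← List.countP_eq_length_filter, ← List.countP_eq_length_filter]
  induction seen with
  | nil => simp at h
  | cons a t ih =>
    rw [List.countP_cons, List.countP_cons]
    have hmono : t.countP (fun y => decide (x + 1 ≤ y)) ≤ t.countP (fun y => decide (x ≤ y)) :=
      List.countP_mono_left (by intro z _ hz
                                exact decide_eq_true (by have := of_decide_eq_true hz; omega))
    rcases List.mem_cons.mp h with rfl | ht
    · rw [if_neg (fun hc => absurd (of_decide_eq_true hc) (by omega)),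
        if_pos (decide_eq_true (le_refl x))]
      omega
    · by_cases h1 : x + 1 ≤ a
      · rw [if_pos (decide_eq_true h1), if_pos (decide_eq_true (by omega : x ≤ a))]
        have := ih ht; omega
      · by_cases h2 : x ≤ a
        · rw [if_neg (fun hc => absurd (of_decide_eq_true hc) h1),
            if_pos (decide_eq_true h2)]
          have := ih ht; omega
        · rw [if_neg (fun hc => absurd (of_decide_eq_true hc) h1),
            if_neg (fun hc => absurd (of_decide_eq_true hc) h2)]
          have := ih ht; omega

-- 'while x in seen: x = x + 1' of A, as a guarded recursion
def pyBumpFree (seen : List Int) (x : Int) : Int :=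
  if x ∈ seen then pyBumpFree seen (x + 1) else x
termination_by (seen.filter (fun y => decide (x ≤ y))).length
decreasing_by exact pyBump_dec seen x (by assumption)

def getMinimumUniqueSum (arr : List Int) : Int :=
  (arr.foldl (fun (seen : PySem.Set Int) elem =>
      if elem ∉ seen then
        PySem.Set.add seen elem
      else
        PySem.Set.add seen (pyBumpFree seen elem)) PySem.Set.empty).sum

-- ===== PORT B =====
def getMinimumUniqueSum_alt (arr : List Int) : Int :=
  ((PySem.List.sorted arr (fun x => x) false).foldl
      (fun (st : Int × Option Int) x =>
        let x' := match st.2 with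
          | some n => if x < n then n else x
          | none => x
        (st.1 + x', some (x' + 1))) ((0 : Int), (none : Option Int))).1

-- ===== PRECONDITION & SPEC =====
def Spec_getMinimumUniqueSum (arr : List Int) (out : Int) : Prop := out = getMinimumUniqueSum_alt arr
instance (arr : List Int) (out : Int) : Decidable (Spec_getMinimumUniqueSum arr out) := by unfold Spec_getMinimumUniqueSum; infer_instance

-- ===== CLAIM (what is proved, stated in full; the proofs are below) =====
def Claim_equal_getMinimumUniqueSum : Prop := ∀ (arr : List Int), Dom_getMinimumUniqueSum arr → Spec_getMinimumUniqueSum arr (getMinimumUniqueSum arr)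

-- ===== LEMMAS AND PROOFS =====

-- Proof model: parking on Finset ℤ.
def pvFree (S : Finset ℤ) (x : ℤ) : ℤ :=
  if x ∈ S then pvFree S (x + 1) else x
termination_by (S.filter (fun y => x ≤ y)).card
decreasing_by
  apply Finset.card_lt_card
  constructor
  · intro y hy; simp at hy ⊢; exact ⟨hy.1, by omega⟩
  · intro hsub
    have hx : x ∈ S.filter (fun y => x ≤ y) := by simp; assumption
    have := hsub hx; simp at this

def pvStep (S : Finset ℤ) (x : ℤ) : Finset ℤ := insert (pvFree S x) S

theorem pvFree_le (S : Finset ℤ) (x : ℤ) : x ≤ pvFree S x := by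
  fun_induction pvFree with
  | case1 x h ih => omega
  | case2 x h => omega

theorem pvFree_not_mem (S : Finset ℤ) (x : ℤ) : pvFree S x ∉ S := by
  fun_induction pvFree with
  | case1 x h ih => exact ih
  | case2 x h => exact h

theorem pvFree_covers (S : Finset ℤ) (x : ℤ) :
    ∀ y, x ≤ y → y < pvFree S x → y ∈ S := by
  fun_induction pvFree with
  | case1 x h ih =>
    intro y hxy hlt
    by_cases hy : y = x
    · exact hy ▸ h
    · exact ih y (by omega) hlt
  | case2 x h => intro y hxy hlt; omega

theorem pvFree_eq_of (S : Finset ℤ) (x f : ℤ) (hf : f ∉ S) (hx : x ≤ f)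
    (hall : ∀ y, x ≤ y → y < f → y ∈ S) : pvFree S x = f := by
  rcases lt_trichotomy (pvFree S x) f with h | h | h
  · exact absurd (hall _ (pvFree_le S x) h) (pvFree_not_mem S x)
  · exact h
  · exact absurd (pvFree_covers S x f hx h) hf

theorem pvStep_comm (S : Finset ℤ) (a b : ℤ) :
    pvStep (pvStep S a) b = pvStep (pvStep S b) a := by
  by_cases hab : pvFree S a = pvFree S b
  · -- both would land on f; second parker goes to the next free slot after f, either way
    set f := pvFree S a with hfa
    have hfb : pvFree S b = f := hab.symm
    set g := pvFree (insert f S) (f + 1) with hg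
    have hga : pvFree (insert f S) a = g := by
      apply pvFree_eq_of
      · exact pvFree_not_mem _ _
      · have := pvFree_le S a; have := pvFree_le (insert f S) (f + 1); omega
      · intro y hy hylt
        by_cases hyf : y ≤ f
        · rcases eq_or_lt_of_le hyf with rfl | hylt'
          · exact Finset.mem_insert_self _ _
          · exact Finset.mem_insert_of_mem (pvFree_covers S a y hy (hfa ▸ hylt'))
        · exact pvFree_covers (insert f S) (f + 1) y (by omega) hylt
    have hgb : pvFree (insert f S) b = g := by
      apply pvFree_eq_of
      · exact pvFree_not_mem _ _
      · have := pvFree_le S b; have := pvFree_le (insert f S) (f + 1); omega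
      · intro y hy hylt
        by_cases hyf : y ≤ f
        · rcases eq_or_lt_of_le hyf with rfl | hylt'
          · exact Finset.mem_insert_self _ _
          · exact Finset.mem_insert_of_mem (pvFree_covers S b y hy (hfb ▸ hylt'))
        · exact pvFree_covers (insert f S) (f + 1) y (by omega) hylt
    simp only [pvStep, ← hfa, hfb, hga, hgb]
  · -- the two landing spots are distinct, so each step ignores the other's insertion
    have h1 : pvFree (insert (pvFree S a) S) b = pvFree S b := by
      apply pvFree_eq_of
      · simp [Finset.mem_insert, pvFree_not_mem S b]
        exact fun h => hab h.symm
      · exact pvFree_le S b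
      · intro y hy hlt; exact Finset.mem_insert_of_mem (pvFree_covers S b y hy hlt)
    have h2 : pvFree (insert (pvFree S b) S) a = pvFree S a := by
      apply pvFree_eq_of
      · simp [Finset.mem_insert, pvFree_not_mem S a, hab]
      · exact pvFree_le S a
      · intro y hy hlt; exact Finset.mem_insert_of_mem (pvFree_covers S a y hy hlt)
    simp only [pvStep, h1, h2, Finset.insert_comm]

-- pyBumpFree on a list computes pvFree on its toFinset
theorem pyBumpFree_eq (seen : List Int) (x : Int) :
    pyBumpFree seen x = pvFree seen.toFinset x := by
  fun_induction pyBumpFree with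
  | case1 x h ih => rw [pvFree, if_pos (by simpa using h)]; exact ih
  | case2 x h => rw [pvFree, if_neg (by simpa using h)]

-- generic fold simulation
theorem foldl_sim {σ₁ σ₂ : Type} (R : σ₁ → σ₂ → Prop) (f : σ₁ → Int → σ₁)
    (g : σ₂ → Int → σ₂) (hstep : ∀ s₁ s₂ x, R s₁ s₂ → R (f s₁ x) (g s₂ x)) :
    ∀ (l : List Int) (s₁ : σ₁) (s₂ : σ₂), R s₁ s₂ → R (l.foldl f s₁) (l.foldl g s₂) := by
  intro l
  induction l with
  | nil => intro s₁ s₂ h; exact h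
  | cons a t ih => intro s₁ s₂ h; exact ih _ _ (hstep _ _ _ h)

-- A's one step, named for the simulation
def pvStepA (seen : PySem.Set Int) (elem : Int) : PySem.Set Int :=
  if elem ∉ seen then PySem.Set.add seen elem
  else PySem.Set.add seen (pyBumpFree seen elem)

theorem pvStepA_sim (seen : List Int) (S : Finset ℤ) (elem : Int)
    (h : seen.Nodup ∧ seen.toFinset = S) :
    (pvStepA seen elem).Nodup ∧ (pvStepA seen elem).toFinset = pvStep S elem := by
  obtain ⟨hnd, rfl⟩ := h
  by_cases hm : elem ∈ seen
  · have hfree := pyBumpFree_eq seen elem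
    have hnotmem : pyBumpFree seen elem ∉ seen := by
      have := pvFree_not_mem seen.toFinset elem
      simpa [hfree] using this
    have hif : pvStepA seen elem = seen ++ [pyBumpFree seen elem] := by
      simp [pvStepA, hm, PySem.Set.add, List.contains_eq_mem, hnotmem]
    constructor
    · rw [hif, List.nodup_append]
      exact ⟨hnd, List.nodup_singleton _,
        by intro a ha b hb heq
           rw [List.mem_singleton] at hb
           subst hb; subst heq; exact hnotmem ha⟩
    · rw [hif, hfree]
      simp only [pvStep]
      ext y
      simp
  · have hfree : pvFree seen.toFinset elem = elem :=
      pvFree_eq_of _ _ _ (by simpa using hm) le_rfl (by intro y h1 h2; omega)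
    have hif : pvStepA seen elem = seen ++ [elem] := by
      simp [pvStepA, hm, PySem.Set.add, List.contains_eq_mem]
    constructor
    · rw [hif, List.nodup_append]
      exact ⟨hnd, List.nodup_singleton _,
        by intro a ha b hb heq
           rw [List.mem_singleton] at hb
           subst hb; subst heq; exact hm ha⟩
    · rw [hif]
      simp only [pvStep, hfree]
      ext y
      simp

-- B's one step, named
def pvStepB (st : Int × Option Int) (x : Int) : Int × Option Int :=
  let x' := match st.2 with
    | some n => if x < n then n else x
    | none => x
  (st.1 + x', some (x' + 1))

-- the sorted scan computes the set fold's sum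
theorem pvScan_eq (l : List Int) : ∀ (S : Finset ℤ) (total nxt : Int),
    l.Pairwise (· ≤ ·) →
    (∀ y ∈ S, y < nxt) →
    (∀ x ∈ l, ∀ y, x ≤ y → y < nxt → y ∈ S) →
    (l.foldl pvStepB (total, some nxt)).1 - total
      = (l.foldl pvStep S).sum (fun x => x) - S.sum (fun x => x) := by
  induction l with
  | nil => intro S total nxt _ _ _; simp
  | cons a t ih =>
    intro S total nxt hsort hlt hcov
    have hbelow : ∀ x ∈ t, a ≤ x := by
      intro x hx; exact (List.pairwise_cons.mp hsort).1 x hx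
    set v : Int := if a < nxt then nxt else a with hv
    have hvnotmem : v ∉ S := by
      intro hmem; have := hlt v hmem; simp [hv] at this; split_ifs at this <;> omega
    have hfree : pvFree S a = v := by
      apply pvFree_eq_of _ _ _ hvnotmem (by simp [hv]; split_ifs <;> omega)
      intro y hy hyv
      rcases lt_or_ge a nxt with hcase | hcase
      · simp [hv, hcase] at hyv
        exact hcov a (List.mem_cons_self) y hy hyv
      · simp [hv, not_lt.mpr hcase] at hyv; omega
    have hstepB : pvStepB (total, some nxt) a = (total + v, some (v + 1)) := by
      simp [pvStepB, hv]
    have hstepS : pvStep S a = insert v S := by simp [pvStep, hfree]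
    have ihapp := ih (insert v S) (total + v) (v + 1)
      (List.pairwise_cons.mp hsort).2
      (by intro y hy
          rcases Finset.mem_insert.mp hy with rfl | hy'
          · omega
          · have := hlt y hy'; simp [hv]; split_ifs <;> omega)
      (by intro x hx y hy hylt
          rcases eq_or_lt_of_le (show y ≤ v by omega) with rfl | hyv
          · exact Finset.mem_insert_self _ _
          · apply Finset.mem_insert_of_mem
            have hax : a ≤ x := hbelow x hx
            rcases lt_or_ge a nxt with hcase | hcase
            · have hvn : v = nxt := by simp [hv, hcase]
              exact hcov x (List.mem_cons_of_mem _ hx) y hy (by omega)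
            · have hvn : v = a := by simp [hv]; omega
              omega)
    have hsum : (insert v S).sum (fun x => x) = v + S.sum (fun x => x) :=
      Finset.sum_insert hvnotmem
    simp only [List.foldl_cons, hstepB, hstepS]
    omega

-- ===== VERDICT (by name: the statement is the Claim_ definition above) =====
theorem getMinimumUniqueSum_spec : Claim_equal_getMinimumUniqueSum := by
  intro arr _
  unfold Spec_getMinimumUniqueSum getMinimumUniqueSum getMinimumUniqueSum_alt
  have hA : (fun (seen : PySem.Set Int) elem =>
      if elem ∉ seen then PySem.Set.add seen elem
      else PySem.Set.add seen (pyBumpFree seen elem)) = pvStepA := rfl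
  have hB : (fun (st : Int × Option Int) (x : Int) =>
      let x' := match st.2 with
        | some n => if x < n then n else x
        | none => x
      (st.1 + x', some (x' + 1))) = pvStepB := rfl
  rw [hA, hB]
  have hsimA : (arr.foldl pvStepA PySem.Set.empty).Nodup ∧
      (arr.foldl pvStepA PySem.Set.empty).toFinset = arr.foldl pvStep ∅ :=
    foldl_sim (fun (s : List Int) (S : Finset ℤ) => s.Nodup ∧ s.toFinset = S)
      pvStepA pvStep pvStepA_sim arr PySem.Set.empty ∅ (by simp [PySem.Set.empty])
  obtain ⟨hnd, hfin⟩ := hsimA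
  have hsumA : (arr.foldl pvStepA PySem.Set.empty).sum = (arr.foldl pvStep ∅).sum (fun x => x) := by
    rw [← hfin, List.sum_toFinset (fun x => x) hnd]
    simp
  have hperm : (PySem.List.sorted arr (fun x => x) false).Perm arr :=
    PySem.List.sorted_perm arr (fun x => x) false
  have horder : arr.foldl pvStep (∅ : Finset ℤ)
      = (PySem.List.sorted arr (fun x => x) false).foldl pvStep ∅ :=
    List.Perm.foldl_eq' hperm.symm (fun x _ y _ z => pvStep_comm z x y) ∅
  have hsorted : (PySem.List.sorted arr (fun x => x) false).Pairwise (· ≤ ·) := by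
    have := PySem.List.sorted_pairwise arr (fun x => x)
    simpa using this
  rcases hs : PySem.List.sorted arr (fun x => x) false with _ | ⟨m, t⟩
  · rw [hsumA, horder, hs]; simp
  · have hsorted' := hs ▸ hsorted
    have hmmin : ∀ x ∈ t, m ≤ x := (List.pairwise_cons.mp hsorted').1
    have hfree0 : pvFree (∅ : Finset ℤ) m = m :=
      pvFree_eq_of _ _ _ (by simp) le_rfl (by intro y h1 h2; omega)
    have hscan := pvScan_eq t {m} m (m + 1)
      (List.pairwise_cons.mp hsorted').2
      (by intro y hy; simp at hy; omega)
      (by intro x hx y hy hylt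
          have := hmmin x hx; simp; omega)
    have hstep0 : pvStepB ((0 : Int), (none : Option Int)) m = (m, some (m + 1)) := by
      simp [pvStepB]
    have hstepS0 : pvStep (∅ : Finset ℤ) m = {m} := by simp [pvStep, hfree0]
    have hm1 : ({m} : Finset ℤ).sum (fun x => x) = m := by simp
    rw [hsumA, horder, hs]
    simp only [List.foldl_cons, hstep0, hstepS0]
    omega
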